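-- pv_equiv track=rewrite | github.com/EhsanQA/ACM-ICPC_Trainings | src/com/company/Range_Extraction.py | solution
-- ===== SOURCE A (Python) =====
-- def solution(arr):
--     index = 0
--     answer = ""
--     while index != len(arr):
--         if indexer(0, arr[index:]) == 2:
--             answer += f"{arr[index]},{arr[index + 1]},"
--             index += indexer(0, arr[index:])
--         elif indexer(0, arr[index:]) == 1:
--             answer += f"{arr[index]},"
--             index += indexer(0, arr[index:])
--         else:
--             answer += f"{arr[index]}-{arr[indexer(0, arr[index:]) + index - 1]},"
--             index += indexer(0, arr[index:])
--     return answer[:len(answer) - 1]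
--
-- def indexer(j, arr):
--     for i in range(len(arr)):
--         if arr[0: i + 1] != [x for x in range(arr[0], arr[i] + 1)]:
--             return i
--     return len(arr)
-- ===== SOURCE B (Python) =====
-- def solution(arr):
--     parts = []
--     i = 0
--     n = len(arr)
--     while i < n:
--         j = i
--         while j + 1 < n and arr[j + 1] == arr[j] + 1:
--             j += 1
--         if j - i >= 2:
--             parts.append(f"{arr[i]}-{arr[j]}")
--         else:
--             parts.extend(str(arr[k]) for k in range(i, j + 1))
--         i = j + 1
--     return ",".join(parts)
-- ===== Notes on version B (the rewrite author's own statement) =====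
-- stated objective: faster
-- what changed: Single linear pass detecting maximal consecutive runs by comparing adjacent elements, collecting formatted pieces in a list joined once, instead of repeatedly materialising range() lists and comparing them against every prefix of every suffix.
import Mathlib
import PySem

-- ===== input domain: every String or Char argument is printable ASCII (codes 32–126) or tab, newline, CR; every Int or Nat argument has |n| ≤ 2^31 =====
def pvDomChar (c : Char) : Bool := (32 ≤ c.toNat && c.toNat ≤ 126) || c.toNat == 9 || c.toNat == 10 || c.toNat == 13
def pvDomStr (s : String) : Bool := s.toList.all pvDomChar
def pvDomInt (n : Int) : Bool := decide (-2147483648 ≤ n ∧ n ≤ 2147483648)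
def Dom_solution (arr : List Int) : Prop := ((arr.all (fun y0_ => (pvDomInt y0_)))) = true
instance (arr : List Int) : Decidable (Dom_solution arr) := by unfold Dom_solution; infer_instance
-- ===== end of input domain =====

-- B replaces A's repeated prefix-vs-range() list comparisons by one linear pass over adjacent
-- elements (objective: faster, asymptotic).  Strings are handled as their code-point lists
-- (exact on this all-ASCII output alphabet).

-- ===== PORT A =====

-- indexer's loop body, i counting up
def indexerGo (arr : List Int) (i : Nat) : Nat :=
  if _h : i < arr.length then
    -- arr[0:i+1] != [x for x in range(arr[0], arr[i]+1)]  (arr nonempty here, indices in range,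
    -- so arr[0] = arr.headD 0 and arr[i] = arr.getD i 0 are exact)
    if arr.take (i + 1) = PySem.List.pyRange (arr.headD 0) (arr.getD i 0 + 1) 1 then
      indexerGo arr (i + 1)
    else i
  else arr.length
  termination_by arr.length - i

-- def indexer(j, arr)  (j is unused in the Python too; the result is a nonnegative count, kept as Nat)
def indexer (_j : Int) (arr : List Int) : Nat := indexerGo arr 0

-- needed by solutionLoop's termination proof
theorem indexerGo_ge_min (arr : List Int) (i : Nat) : min i arr.length ≤ indexerGo arr i := by
  unfold indexerGo
  split
  · split
    · have := indexerGo_ge_min arr (i + 1)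
      omega
    · omega
  · omega
  termination_by arr.length - i

theorem indexer_pos (arr : List Int) (h : arr ≠ []) : 1 ≤ indexer 0 arr := by
  unfold indexer indexerGo
  have hl : 0 < arr.length := List.length_pos_of_ne_nil h
  simp only [hl, dite_true]
  cases arr with
  | nil => simp at hl
  | cons a t =>
    simp [PySem.List.pyRange_one_singleton]
    have := indexerGo_ge_min (a :: t) 1
    simp at this
    omega

-- while index != len(arr): … (the loop keeps index ≤ len(arr), so the guard is written index < len(arr),
-- which only makes the recursion total; reachable states agree)
def solutionLoop (arr : List Int) (index : Nat) (answer : List Char) : List Char :=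
  if _h : index < arr.length then
    -- Python recomputes indexer(0, arr[index:]) at each use; the calls are inlined likewise
    if indexer 0 (arr.drop index) = 2 then
      -- answer += f"{arr[index]},{arr[index+1]},"; index += indexer(0, arr[index:])
      solutionLoop arr (index + indexer 0 (arr.drop index))
        (answer ++ PySem.Int.toChars (arr.getD index 0) ++ [','] ++
         PySem.Int.toChars (arr.getD (index + 1) 0) ++ [','])
    else if indexer 0 (arr.drop index) = 1 then
      solutionLoop arr (index + indexer 0 (arr.drop index))
        (answer ++ PySem.Int.toChars (arr.getD index 0) ++ [','])
    else
      -- answer += f"{arr[index]}-{arr[indexer(0, arr[index:]) + index - 1]},"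
      solutionLoop arr (index + indexer 0 (arr.drop index))
        (answer ++ PySem.Int.toChars (arr.getD index 0) ++ ['-'] ++
         PySem.Int.toChars (arr.getD (indexer 0 (arr.drop index) + index - 1) 0) ++ [','])
  else answer
  termination_by arr.length - index
  decreasing_by all_goals
    (have hp := indexer_pos (arr.drop index)
      (by intro hn; have := List.drop_eq_nil_iff.mp hn; omega)
     omega)

def solution (arr : List Int) : String :=
  let answer := solutionLoop arr 0 []
  -- return answer[:len(answer) - 1]
  String.ofList (PySem.List.slice answer none (some ((answer.length : Int) - 1)))

-- ===== PORT B =====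

-- inner while: while j + 1 < n and arr[j+1] == arr[j] + 1: j += 1
def runEnd (arr : List Int) (j : Nat) : Nat :=
  if _h : j + 1 < arr.length ∧ arr.getD (j + 1) 0 = arr.getD j 0 + 1 then
    runEnd arr (j + 1)
  else j
  termination_by arr.length - j
  decreasing_by omega

-- needed by solutionAltLoop's termination proof
theorem runEnd_ge (arr : List Int) (j : Nat) : j ≤ runEnd arr j := by
  unfold runEnd
  split
  · exact le_trans (Nat.le_succ j) (runEnd_ge arr (j + 1))
  · exact le_refl j
  termination_by arr.length - j
  decreasing_by omega

-- outer while over i, collecting formatted parts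
def solutionAltLoop (arr : List Int) (i : Nat) (parts : List (List Char)) : List (List Char) :=
  if _h : i < arr.length then
    if 2 ≤ runEnd arr i - i then
      solutionAltLoop arr (runEnd arr i + 1)
        (parts ++ [PySem.Int.toChars (arr.getD i 0) ++ ['-'] ++
                   PySem.Int.toChars (arr.getD (runEnd arr i) 0)])
    else
      -- parts.extend(str(arr[k]) for k in range(i, j + 1))
      solutionAltLoop arr (runEnd arr i + 1)
        (parts ++ (List.range' i (runEnd arr i + 1 - i)).map
          (fun k => PySem.Int.toChars (arr.getD k 0)))
  else parts
  termination_by arr.length - i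
  decreasing_by all_goals (have := runEnd_ge arr i; omega)

def solution_alt (arr : List Int) : String :=
  String.ofList (PySem.Chars.join [','] (solutionAltLoop arr 0 []))

-- ===== PRECONDITION & SPEC =====
def Spec_solution (arr : List Int) (out : String) : Prop := out = solution_alt arr
instance (arr : List Int) (out : String) : Decidable (Spec_solution arr out) := by unfold Spec_solution; infer_instance

-- ===== CLAIM (what is proved, stated in full; the proofs are below) =====
def Claim_equal_solution : Prop := ∀ (arr : List Int), Dom_solution arr → Spec_solution arr (solution arr)

-- ===== LEMMAS AND PROOFS =====

-- length (in elements) of the run of consecutive successors of a that starts the list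
def cnt (a : Int) : List Int → Nat
  | [] => 0
  | x :: t => if x = a + 1 then cnt x t + 1 else 0

theorem getD_lt (arr : List Int) (n : Nat) (h : n < arr.length) : arr.getD n 0 = arr[n] := by
  rw [List.getD_eq_getElem?_getD, List.getElem?_eq_getElem h]
  rfl

theorem drop_cons (arr : List Int) (n : Nat) (h : n < arr.length) :
    arr.drop n = arr.getD n 0 :: arr.drop (n + 1) := by
  rw [getD_lt _ _ h]
  exact List.drop_eq_getElem_cons h

theorem runEnd_eq_cnt (arr : List Int) (i : Nat) :
    runEnd arr i = i + cnt (arr.getD i 0) (arr.drop (i + 1)) := by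
  unfold runEnd
  split
  · rename_i h
    obtain ⟨h1, h2⟩ := h
    rw [runEnd_eq_cnt arr (i + 1)]
    rw [drop_cons arr (i + 1) h1, cnt, if_pos h2]
    omega
  · rename_i h
    rw [Classical.not_and_iff_not_or_not] at h
    by_cases h1 : i + 1 < arr.length
    · have h2 : ¬ arr.getD (i + 1) 0 = arr.getD i 0 + 1 := by tauto
      rw [drop_cons arr (i + 1) h1, cnt, if_neg h2]
      omega
    · have : arr.drop (i + 1) = [] := by
        apply List.drop_eq_nil_of_le
        omega
      rw [this, cnt]
      omega
  termination_by arr.length - i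
  decreasing_by omega

theorem indexerGo_eq_cnt (arr : List Int) (i : Nat) (hlen : i + 1 ≤ arr.length)
    (hinv : arr.take (i + 1) = PySem.List.pyRange (arr.headD 0) (arr.getD i 0 + 1) 1) :
    indexerGo arr (i + 1) = i + 1 + cnt (arr.getD i 0) (arr.drop (i + 1)) := by
  -- value of arr[i] forced by the invariant's lengths
  have hval : arr.getD i 0 = arr.headD 0 + i := by
    have := congrArg List.length hinv
    rw [List.length_take, PySem.List.length_pyRange_one] at this
    omega
  unfold indexerGo
  split
  · rename_i h1
    have htake : arr.take (i + 1 + 1) = arr.take (i + 1) ++ [arr.getD (i + 1) 0] := by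
      rw [List.take_add_one, List.getElem?_eq_getElem h1, getD_lt arr (i + 1) h1]
      rfl
    -- the checked equality at i+1 holds iff arr[i+1] = arr[i] + 1
    have hiff : (arr.take (i + 1 + 1) = PySem.List.pyRange (arr.headD 0) (arr.getD (i + 1) 0 + 1) 1)
        ↔ arr.getD (i + 1) 0 = arr.getD i 0 + 1 := by
      constructor
      · intro he
        have := congrArg List.length he
        rw [List.length_take, PySem.List.length_pyRange_one] at this
        omega
      · intro he
        rw [htake, hinv, he, hval]
        rw [← PySem.List.pyRange_one_succ_right (by omega)]
    by_cases hc : arr.getD (i + 1) 0 = arr.getD i 0 + 1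
    · rw [if_pos (hiff.mpr hc)]
      rw [indexerGo_eq_cnt arr (i + 1) (by omega) (hiff.mpr hc)]
      rw [drop_cons arr (i + 1) h1, cnt, if_pos hc]
      omega
    · rw [if_neg (fun he => hc (hiff.mp he))]
      rw [drop_cons arr (i + 1) h1, cnt, if_neg hc]
  · rename_i h1
    have he : arr.drop (i + 1) = [] := by
      apply List.drop_eq_nil_of_le
      omega
    rw [he, cnt]
    omega
  termination_by arr.length - i
  decreasing_by omega

theorem indexer_eq_cnt (arr : List Int) (h : arr ≠ []) :
    indexer 0 arr = 1 + cnt (arr.getD 0 0) (arr.drop 1) := by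
  have hl : 0 < arr.length := List.length_pos_of_ne_nil h
  unfold indexer indexerGo
  rw [dif_pos hl]
  cases arr with
  | nil => simp at hl
  | cons a t =>
    simp only [List.headD_cons, List.getD_cons_zero, List.take_succ_cons, List.take_zero]
    rw [if_pos (by rw [PySem.List.pyRange_one_singleton])]
    have := indexerGo_eq_cnt (a :: t) 0 (by simpa using hl)
      (by simp [PySem.List.pyRange_one_singleton])
    simpa using this

-- the A-loop prepends its accumulator
theorem solutionLoop_acc (arr : List Int) (index : Nat) (x y : List Char) :
    solutionLoop arr index (x ++ y) = x ++ solutionLoop arr index y := by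
  conv_lhs => rw [solutionLoop]
  conv_rhs => rw [solutionLoop]
  split
  · split
    · simp only [List.append_assoc]
      exact solutionLoop_acc arr _ x _
    · split
      · simp only [List.append_assoc]
        exact solutionLoop_acc arr _ x _
      · simp only [List.append_assoc]
        exact solutionLoop_acc arr _ x _
  · rfl
  termination_by arr.length - index
  decreasing_by all_goals
    (have hp := indexer_pos (arr.drop index)
      (by intro hn; have := List.drop_eq_nil_iff.mp hn; omega)
     omega)

theorem solutionLoop_acc0 (arr : List Int) (index : Nat) (answer : List Char) :
    solutionLoop arr index answer = answer ++ solutionLoop arr index [] := by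
  have := solutionLoop_acc arr index answer []
  simpa using this

-- the B-loop prepends its accumulator
theorem solutionAltLoop_acc (arr : List Int) (i : Nat) (x y : List (List Char)) :
    solutionAltLoop arr i (x ++ y) = x ++ solutionAltLoop arr i y := by
  conv_lhs => rw [solutionAltLoop]
  conv_rhs => rw [solutionAltLoop]
  split
  · split
    · simp only [List.append_assoc]
      exact solutionAltLoop_acc arr _ x _
    · simp only [List.append_assoc]
      exact solutionAltLoop_acc arr _ x _
  · rfl
  termination_by arr.length - i
  decreasing_by all_goals (have := runEnd_ge arr i; omega)

theorem solutionAltLoop_acc0 (arr : List Int) (i : Nat) (parts : List (List Char)) :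
    solutionAltLoop arr i parts = parts ++ solutionAltLoop arr i [] := by
  have := solutionAltLoop_acc arr i parts []
  simpa using this

def glue (ps : List (List Char)) : List Char := (ps.map (· ++ [','])).flatten

theorem glue_append (ps qs : List (List Char)) : glue (ps ++ qs) = glue ps ++ glue qs := by
  simp [glue]

theorem core (arr : List Int) (i : Nat) :
    solutionLoop arr i [] = glue (solutionAltLoop arr i []) := by
  rw [solutionLoop, solutionAltLoop]
  split
  · rename_i h
    have hnil : arr.drop i ≠ [] := by
      intro hn
      have := List.drop_eq_nil_iff.mp hn
      omega
    have hL : indexer 0 (arr.drop i) = 1 + cnt (arr.getD i 0) (arr.drop (i + 1)) := by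
      rw [indexer_eq_cnt _ hnil]
      have e1 : (arr.drop i).getD 0 0 = arr.getD i 0 := by
        simp [List.getD_eq_getElem?_getD, List.getElem?_drop]
      have e2 : (arr.drop i).drop 1 = arr.drop (i + 1) := by
        rw [List.drop_drop, Nat.add_comm]
      rw [e1, e2]
    have hj : runEnd arr i = i + cnt (arr.getD i 0) (arr.drop (i + 1)) := runEnd_eq_cnt arr i
    set c := cnt (arr.getD i 0) (arr.drop (i + 1)) with hc
    simp only [hL, hj]
    by_cases h2 : c = 1
    · -- run of length 2
      rw [if_pos (by omega), if_neg (by omega), h2]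
      rw [show i + 1 + 1 - i = 2 from by omega]
      rw [show List.range' i 2 = [i, i + 1] from rfl]
      rw [show i + (1 + 1) = i + 1 + 1 from by omega]
      rw [solutionLoop_acc0, solutionAltLoop_acc0, core arr (i + 1 + 1), glue_append]
      simp [glue]
    · by_cases h1 : c = 0
      · -- run of length 1
        rw [if_neg (by omega), if_pos (by omega), if_neg (by omega), h1]
        rw [show i + 0 + 1 - i = 1 from by omega]
        rw [show List.range' i 1 = [i] from rfl]
        rw [show i + (1 + 0) = i + 0 + 1 from by omega]
        rw [solutionLoop_acc0, solutionAltLoop_acc0, core arr (i + 0 + 1), glue_append]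
        simp [glue]
      · -- run of length ≥ 3
        rw [if_neg (by omega), if_neg (by omega), if_pos (by omega)]
        rw [show 1 + c + i - 1 = i + c from by omega]
        rw [show i + (1 + c) = i + c + 1 from by omega]
        rw [solutionLoop_acc0, solutionAltLoop_acc0, core arr (i + c + 1), glue_append]
        simp [glue]
  · simp [glue]
  termination_by arr.length - i
  decreasing_by all_goals omega

-- stripping the final comma of the glued pieces is exactly the ","-join
theorem glue_dropLast (ps : List (List Char)) :
    (glue ps).dropLast = PySem.Chars.join [','] ps := by
  induction ps with
  | nil => simp [glue, PySem.Chars.join, List.intercalate]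
  | cons p ps ih =>
    cases ps with
    | nil => simp [glue, PySem.Chars.join_singleton]
    | cons q ps' =>
      rw [PySem.Chars.join_cons_cons]
      have hg : glue (p :: q :: ps') = (p ++ [',']) ++ glue (q :: ps') := by
        simp [glue]
      rw [hg]
      have hne : glue (q :: ps') ≠ [] := by
        simp [glue]
      rw [List.dropLast_append_of_ne_nil hne, ih]

-- answer[:len(answer)-1] is dropLast for every answer (including the empty one)
theorem slice_len_sub_one (xs : List Char) :
    PySem.List.slice xs none (some ((xs.length : Int) - 1)) = xs.dropLast := by
  cases xs with
  | nil => simp [PySem.List.slice_to_neg_one ([] : List Char)]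
  | cons a t =>
    have h : ((a :: t).length : Int) - 1 = ((t.length : Nat) : Int) := by simp
    rw [h, PySem.List.slice_to_natCast, List.dropLast_eq_take]
    simp

-- ===== VERDICT (by name: the statement is the Claim_ definition above) =====
theorem solution_spec : Claim_equal_solution := by
  intro arr _
  unfold Spec_solution solution solution_alt
  show String.ofList (PySem.List.slice (solutionLoop arr 0 []) none
        (some (((solutionLoop arr 0 []).length : Int) - 1))) = _
  rw [core arr 0, slice_len_sub_one, glue_dropLast]
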